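-- pv_equiv track=rewrite | github.com/sajastu/MultiPScienceSum | tokenize_ds.py | is_bad_section
-- ===== SOURCE A (Python) =====
-- BAD_SECTIONS = ['acknowledgment', 'acknowledgments' , 'acknowledgements',
--          'fund' ,'funding' ,
--      'appendices' , 'proof of' ,
--         'related work' , 'previous works' , 'references',
--          'figure captions' , 'acknowledgement' , 'appendix']
--
-- def ngrams(input, n):
--     input = input.split(' ')
--     output = []
--     for i in range(len(input)-n+1):
--         output.append(input[i:i+n])
--     return output
--
-- def is_bad_section(heading):
--
--     # appendix
--     if heading.startswith(('A ', 'B ', 'C ', 'D ', 'E ', 'F ', 'G ')):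
--         return True
--
--     while heading[0].isdigit() or heading[0] == '.':
--         heading = heading[1:]
--     heading = heading.strip()
--
--     one_grams = ngrams(heading.lower(), 1)
--     ongrams = []
--     for oneg in one_grams:
--         ongrams.append(oneg[0])
--
--     for one_gram in ongrams:
--         for bad_sect in BAD_SECTIONS:
--             if one_gram.strip() == bad_sect.strip():
--                 return True
--
--     if len(heading.split(' ')) > 1:
--         two_grams = ngrams(heading.lower(), 2)
--         twograms = []
--         for tg in two_grams:
--             twograms.append(f'{tg[0]} {tg[1]}')
--
--         for two_gram in twograms:
--             for bad_sect in BAD_SECTIONS: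
--                 if two_gram.strip() == bad_sect.strip():
--                     return True
--     return False
-- ===== SOURCE B (Python) =====
-- BAD_SECTIONS = ['acknowledgment', 'acknowledgments' , 'acknowledgements',
--          'fund' ,'funding' ,
--      'appendices' , 'proof of' ,
--         'related work' , 'previous works' , 'references',
--          'figure captions' , 'acknowledgement' , 'appendix']
--
-- BAD = set(BAD_SECTIONS)
--
-- def is_bad_section(heading):
--     if heading.startswith(('A ', 'B ', 'C ', 'D ', 'E ', 'F ', 'G ')):
--         return True
--     while heading[0].isdigit() or heading[0] == '.':
--         heading = heading[1:]
--     # single left-to-right pass over the words, carrying the previous word: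
--     # at each word test its unigram and the bigram it closes, no gram lists built
--     prev = None
--     for w in heading.strip().lower().split(' '):
--         if w.strip() in BAD:
--             return True
--         if prev is not None and (prev + ' ' + w).strip() in BAD:
--             return True
--         prev = w
--     return False
-- ===== Notes on version B (the rewrite author's own statement) =====
-- stated objective: simpler
-- what changed: Replaces A's staged passes (slice-based ngrams builder, two intermediate gram lists, two nested early-return scans over BAD_SECTIONS) with one left-to-right pass over the words carrying the previous word, testing each unigram and the bigram it closes against a precomputed BAD set; the gram lists and the redundant len>1 guard disappear.
-- outside the precondition, e.g. on is_bad_section('.'): A raises IndexError, B raises IndexError; on is_bad_section(''): A raises IndexError, B raises IndexError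
import Mathlib
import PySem

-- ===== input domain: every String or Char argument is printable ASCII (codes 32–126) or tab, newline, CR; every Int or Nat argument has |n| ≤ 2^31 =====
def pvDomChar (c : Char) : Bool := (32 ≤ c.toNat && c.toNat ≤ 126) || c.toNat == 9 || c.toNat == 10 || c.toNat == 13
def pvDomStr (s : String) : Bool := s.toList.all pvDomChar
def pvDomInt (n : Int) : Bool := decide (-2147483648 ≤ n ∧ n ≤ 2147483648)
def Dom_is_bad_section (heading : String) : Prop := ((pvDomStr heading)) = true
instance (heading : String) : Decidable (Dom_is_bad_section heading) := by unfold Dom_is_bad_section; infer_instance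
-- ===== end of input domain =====

-- B replaces A's staged gram-list construction and nested scans over BAD_SECTIONS with a single
-- left-to-right pass over the words carrying the previous word, testing each unigram and the
-- bigram it closes against a precomputed BAD set (objective: simpler).

-- shared module constant BAD_SECTIONS (identical in A and B)
def pvBad : List (List Char) :=
  ["acknowledgment".toList, "acknowledgments".toList, "acknowledgements".toList,
   "fund".toList, "funding".toList,
   "appendices".toList, "proof of".toList,
   "related work".toList, "previous works".toList, "references".toList,
   "figure captions".toList, "acknowledgement".toList, "appendix".toList]

-- the startswith tuple (identical in A and B)
def pvPrefixes : List String := ["A ", "B ", "C ", "D ", "E ", "F ", "G "]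

-- the `while heading[0].isdigit() or heading[0] == '.': heading = heading[1:]` loop (identical in
-- A and B); Python raises IndexError when the string runs out — those inputs are outside Pre_.
def pvDropLead : List Char → List Char
  | [] => []
  | c :: cs => if PySem.Chars.isdigit c || c == '.' then pvDropLead cs else c :: cs

-- ===== PORT A =====
-- helper ngrams(input, n) of A
def pvNgrams (input : List Char) (n : Int) : List (List (List Char)) :=
  let inp := PySem.Chars.splitOn input [' ']
  (PySem.List.pyRange 0 ((inp.length : Int) - n + 1) 1).foldl
    (fun out i => out ++ [PySem.List.slice inp (some i) (some (i + n))]) []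

def is_bad_section (heading : String) : Bool :=
  if pvPrefixes.any (fun p => PySem.Str.startswith heading p) then true
  else
    let h1 := pvDropLead heading.toList
    let h2 := PySem.Chars.strip h1
    let one_grams := pvNgrams (PySem.Chars.lower h2) 1
    let ongrams := one_grams.foldl (fun acc oneg => acc ++ [PySem.List.pyGetD oneg 0 []]) []
    if ongrams.any (fun og => pvBad.any (fun b => PySem.Chars.strip og == PySem.Chars.strip b)) then
      true
    else if (PySem.Chars.splitOn h2 [' ']).length > 1 then
      let two_grams := pvNgrams (PySem.Chars.lower h2) 2
      let twograms := two_grams.foldl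
        (fun acc tg => acc ++ [PySem.List.pyGetD tg 0 [] ++ ' ' :: PySem.List.pyGetD tg 1 []]) []
      twograms.any (fun tg => pvBad.any (fun b => PySem.Chars.strip tg == PySem.Chars.strip b))
    else false

-- ===== PORT B =====
-- the module constant BAD = set(BAD_SECTIONS)
def pvBadSet : PySem.Set (List Char) := PySem.Set.ofList pvBad

-- the single-pass for-loop with early returns, carrying `prev`
def pvScan : Option (List Char) → List (List Char) → Bool
  | _, [] => false
  | prev, w :: rest =>
    if PySem.Set.contains pvBadSet (PySem.Chars.strip w) then true
    else if (match prev with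
             | some p => PySem.Set.contains pvBadSet (PySem.Chars.strip (p ++ ' ' :: w))
             | none => false) then true
    else pvScan (some w) rest

def is_bad_section_alt (heading : String) : Bool :=
  if pvPrefixes.any (fun p => PySem.Str.startswith heading p) then true
  else
    let h := pvDropLead heading.toList
    pvScan none (PySem.Chars.splitOn (PySem.Chars.lower (PySem.Chars.strip h)) [' '])

-- ===== PRECONDITION & SPEC =====
-- Pre_ excludes exactly the inputs on which A raises IndexError: headings whose characters are
-- all ASCII digits or '.', including the empty heading (the stripping while-loop runs off the end).
def Pre_is_bad_section (heading : String) : Prop :=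
  heading.toList.any (fun c => !(PySem.Chars.isdigit c || c == '.')) = true
instance (heading : String) : Decidable (Pre_is_bad_section heading) := by
  unfold Pre_is_bad_section; infer_instance

def pvWitness_is_bad_section : String := "1. Related Work"

def Spec_is_bad_section (heading : String) (out : Bool) : Prop := out = is_bad_section_alt heading
instance (heading : String) (out : Bool) : Decidable (Spec_is_bad_section heading out) := by
  unfold Spec_is_bad_section; infer_instance

-- ===== CLAIM (what is proved, stated in full; the proofs are below) =====
def Claim_equal_is_bad_section : Prop := ∀ (heading : String), Dom_is_bad_section heading → Pre_is_bad_section heading → Spec_is_bad_section heading (is_bad_section heading)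

-- ===== LEMMAS AND PROOFS =====

theorem lowerChar_space (c : Char) : (PySem.Chars.lowerChar c = ' ') ↔ c = ' ' := by
  unfold PySem.Chars.lowerChar PySem.Chars.isupper
  split
  · rename_i hu
    simp only [Bool.and_eq_true, decide_eq_true_eq] at hu
    obtain ⟨h1, h2⟩ := hu
    rw [Char.le_def, UInt32.le_iff_toNat_le] at h1 h2
    have h1' : 65 ≤ c.toNat := h1
    have h2' : c.toNat ≤ 90 := h2
    constructor
    · intro h
      have h3 := congrArg Char.toNat h
      rw [Char.toNat_ofNat] at h3
      have hv : (c.toNat + 32).isValidChar := Or.inl (by omega)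
      rw [if_pos hv] at h3
      have hsp : (' ' : Char).toNat = 32 := rfl
      omega
    · intro h
      subst h
      exact absurd h1' (by decide)
  · simp

theorem isPrefixOf_space_lower (l : List Char) :
    [' '].isPrefixOf (PySem.Chars.lower l) = [' '].isPrefixOf l := by
  cases l with
  | nil => rfl
  | cons c rest =>
    simp only [PySem.Chars.lower, List.map_cons, List.isPrefixOf, Bool.and_true]
    have := lowerChar_space c
    by_cases hc : c = ' '
    · subst hc
      simp [this.mpr rfl]
    · have : PySem.Chars.lowerChar c ≠ ' ' := fun h => hc (this.mp h)
      simp [Ne.symm hc, Ne.symm this]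

theorem go_lower (fuel : Nat) : ∀ (l cur : List Char) (acc : List (List Char)),
    PySem.Chars.splitOn.go [' '] fuel (PySem.Chars.lower l) (PySem.Chars.lower cur)
      (acc.map PySem.Chars.lower)
    = (PySem.Chars.splitOn.go [' '] fuel l cur acc).map PySem.Chars.lower := by
  induction fuel with
  | zero =>
    intro l cur acc
    simp [PySem.Chars.splitOn.go, PySem.Chars.lower]
  | succ n ih =>
    intro l cur acc
    cases l with
    | nil => simp [PySem.Chars.splitOn.go, PySem.Chars.lower]
    | cons c rest =>
      rw [show PySem.Chars.lower (c :: rest) = PySem.Chars.lowerChar c :: PySem.Chars.lower rest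
            from rfl]
      rw [PySem.Chars.splitOn.go, PySem.Chars.splitOn.go]
      have hpre : [' '].isPrefixOf (PySem.Chars.lowerChar c :: PySem.Chars.lower rest)
          = [' '].isPrefixOf (c :: rest) := isPrefixOf_space_lower (c :: rest)
      rw [hpre]
      by_cases hp : [' '].isPrefixOf (c :: rest) = true
      · rw [if_pos hp, if_pos hp]
        have hdrop : (PySem.Chars.lowerChar c :: PySem.Chars.lower rest).drop [' '].length
            = PySem.Chars.lower rest := rfl
        rw [hdrop]
        have := ih rest [] (cur.reverse :: acc)
        simpa [PySem.Chars.lower] using this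
      · rw [if_neg hp, if_neg hp]
        have := ih rest (c :: cur) acc
        simpa [PySem.Chars.lower] using this

theorem splitOn_lower (s : List Char) :
    PySem.Chars.splitOn (PySem.Chars.lower s) [' ']
      = (PySem.Chars.splitOn s [' ']).map PySem.Chars.lower := by
  unfold PySem.Chars.splitOn
  have hlen : (PySem.Chars.lower s).length = s.length := by
    simp [PySem.Chars.lower]
  rw [hlen]
  have := go_lower (s.length + 1) s [] []
  simpa [PySem.Chars.lower] using this

theorem foldl_append_single {α β : Type} (f : α → β) (xs : List α) (init : List β) :
    xs.foldl (fun out i => out ++ [f i]) init = init ++ xs.map f := by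
  induction xs generalizing init with
  | nil => simp
  | cons x xs ih => simp [List.foldl_cons, ih]

theorem ngrams_one (s : List Char) :
    pvNgrams s 1 = (PySem.Chars.splitOn s [' ']).map (fun w => [w]) := by
  show (PySem.List.pyRange 0 (((PySem.Chars.splitOn s [' ']).length : Int) - 1 + 1) 1).foldl
      (fun out i => out ++ [PySem.List.slice (PySem.Chars.splitOn s [' ']) (some i) (some (i + 1))])
      [] = _
  set inp := PySem.Chars.splitOn s [' '] with hinp
  have hb : ((inp.length : Int) - 1 + 1) = (inp.length : Int) := by ring
  rw [hb, PySem.List.pyRange_one, foldl_append_single]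
  simp only [List.nil_append, List.map_map]
  apply List.ext_getElem
  · simp
  · intro i hi1 hi2
    simp only [List.getElem_map, List.getElem_range, Function.comp_apply]
    have hi : i < inp.length := by simpa using hi2
    rw [show ((0 : Int) + (i : Int)) = ((i : Nat) : Int) from by ring]
    rw [show ((i : Int) + 1) = (((i + 1 : Nat)) : Int) from by push_cast; ring,
      PySem.List.slice_natCast]
    rw [List.drop_eq_getElem_cons hi]
    simp only [Nat.add_sub_cancel_left, List.take_succ_cons, List.take_zero]

theorem ngrams_two (s : List Char) :
    pvNgrams s 2
      = ((PySem.Chars.splitOn s [' ']).zip (PySem.Chars.splitOn s [' ']).tail).map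
          (fun p => [p.1, p.2]) := by
  show (PySem.List.pyRange 0 (((PySem.Chars.splitOn s [' ']).length : Int) - 2 + 1) 1).foldl
      (fun out i => out ++ [PySem.List.slice (PySem.Chars.splitOn s [' ']) (some i) (some (i + 2))])
      [] = _
  set inp := PySem.Chars.splitOn s [' '] with hinp
  rw [PySem.List.pyRange_one, foldl_append_single]
  simp only [List.nil_append, List.map_map]
  apply List.ext_getElem
  · simp [List.length_zip, List.length_tail]
    omega
  · intro i hi1 hi2
    have hi : i + 1 < inp.length := by
      simp at hi1
      omega
    simp only [List.getElem_map, List.getElem_range, Function.comp_apply, List.getElem_zip,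
      List.getElem_tail]
    rw [show ((0 : Int) + (i : Int)) = ((i : Nat) : Int) from by ring]
    rw [show ((i : Int) + 2) = (((i + 2 : Nat)) : Int) from by push_cast; ring,
      PySem.List.slice_natCast]
    rw [List.drop_eq_getElem_cons (by omega : i < inp.length)]
    rw [show i + 2 - i = 2 from by omega]
    rw [show inp.drop (i + 1) = inp[i + 1] :: inp.drop (i + 2) from
      List.drop_eq_getElem_cons hi]
    simp only [List.take_succ_cons, List.take_zero]

theorem strip_bad : ∀ b ∈ pvBad, PySem.Chars.strip b = b := by decide

theorem pyGetD_pair_zero {α : Type} (a b : α) (d : α) :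
    PySem.List.pyGetD [a, b] 0 d = a := by
  simp [PySem.List.pyGetD]

theorem pyGetD_pair_one {α : Type} (a b : α) (d : α) :
    PySem.List.pyGetD [a, b] 1 d = b := by
  simp [PySem.List.pyGetD]

theorem pyGetD_single_zero {α : Type} (a : α) (d : α) :
    PySem.List.pyGetD [a] 0 d = a := by
  simp [PySem.List.pyGetD]

theorem contains_bad (x : List Char) :
    PySem.Set.contains pvBadSet x = true ↔ x ∈ pvBad := by
  simp only [PySem.Set.contains_iff, pvBadSet, PySem.Set.mem_ofList]

-- characterisation of B's single pass started with prev = some p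
theorem scan_some (ws : List (List Char)) : ∀ p,
    pvScan (some p) ws = true
      ↔ (∃ w ∈ ws, PySem.Set.contains pvBadSet (PySem.Chars.strip w) = true)
        ∨ (∃ q ∈ (p :: ws).zip ws,
            PySem.Set.contains pvBadSet (PySem.Chars.strip (q.1 ++ ' ' :: q.2)) = true) := by
  induction ws with
  | nil => intro p; simp [pvScan]
  | cons w rest ih =>
    intro p
    rw [pvScan]
    split_ifs with hu hb
    · simp only [true_iff]
      exact Or.inl ⟨w, List.mem_cons_self, hu⟩
    · simp only [true_iff]
      exact Or.inr ⟨(p, w), by simp [List.zip], hb⟩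
    · rw [ih w]
      constructor
      · rintro (⟨x, hx, hxc⟩ | ⟨q, hq, hqc⟩)
        · exact Or.inl ⟨x, List.mem_cons_of_mem _ hx, hxc⟩
        · exact Or.inr ⟨q, List.mem_cons_of_mem _ hq, hqc⟩
      · rintro (⟨x, hx, hxc⟩ | ⟨q, hq, hqc⟩)
        · rcases List.mem_cons.mp hx with rfl | hx'
          · exact absurd hxc hu
          · exact Or.inl ⟨x, hx', hxc⟩
        · rcases List.mem_cons.mp hq with rfl | hq'
          · exact absurd hqc hb
          · exact Or.inr ⟨q, hq', hqc⟩

theorem scan_none (ws : List (List Char)) :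
    pvScan none ws = true
      ↔ (∃ w ∈ ws, PySem.Set.contains pvBadSet (PySem.Chars.strip w) = true)
        ∨ (∃ q ∈ ws.zip ws.tail,
            PySem.Set.contains pvBadSet (PySem.Chars.strip (q.1 ++ ' ' :: q.2)) = true) := by
  cases ws with
  | nil => simp [pvScan]
  | cons w rest =>
    rw [pvScan]
    split_ifs with hu hf
    · simp only [true_iff]
      exact Or.inl ⟨w, List.mem_cons_self, hu⟩
    · exact hf.elim
    · rw [scan_some rest w]
      simp only [List.tail_cons]
      constructor
      · rintro (⟨x, hx, hxc⟩ | h)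
        · exact Or.inl ⟨x, List.mem_cons_of_mem _ hx, hxc⟩
        · exact Or.inr h
      · rintro (⟨x, hx, hxc⟩ | h)
        · rcases List.mem_cons.mp hx with rfl | hx'
          · exact absurd hxc hu
          · exact Or.inl ⟨x, hx', hxc⟩
        · exact Or.inr h

-- the whole tail of A agrees with B's single pass for EVERY value of the stripped heading
theorem tail_eq (h : List Char) :
    (let h2 := PySem.Chars.strip h
     let one_grams := pvNgrams (PySem.Chars.lower h2) 1
     let ongrams := one_grams.foldl (fun acc oneg => acc ++ [PySem.List.pyGetD oneg 0 []]) []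
     if ongrams.any (fun og => pvBad.any (fun b => PySem.Chars.strip og == PySem.Chars.strip b)) then
       true
     else if (PySem.Chars.splitOn h2 [' ']).length > 1 then
       let two_grams := pvNgrams (PySem.Chars.lower h2) 2
       let twograms := two_grams.foldl
         (fun acc tg => acc ++ [PySem.List.pyGetD tg 0 [] ++ ' ' :: PySem.List.pyGetD tg 1 []]) []
       twograms.any (fun tg => pvBad.any (fun b => PySem.Chars.strip tg == PySem.Chars.strip b))
     else false)
    = pvScan none (PySem.Chars.splitOn (PySem.Chars.lower (PySem.Chars.strip h)) [' ']) := by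
  simp only []
  set h2 := PySem.Chars.strip h with hh2
  rw [ngrams_one, ngrams_two, foldl_append_single, foldl_append_single]
  set ws := PySem.Chars.splitOn (PySem.Chars.lower h2) [' '] with hws
  set ts := PySem.Chars.splitOn h2 [' '] with hts
  have hlen : ws.length = ts.length := by rw [hws, hts, splitOn_lower]; simp
  simp only [List.nil_append, List.map_map, Function.comp_def]
  simp only [pyGetD_single_zero, pyGetD_pair_zero, pyGetD_pair_one, List.map_id']
  rw [Bool.eq_iff_iff, scan_none]
  have hchar : ∀ og : List Char,
      (pvBad.any fun b => PySem.Chars.strip og == PySem.Chars.strip b) = true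
        ↔ PySem.Set.contains pvBadSet (PySem.Chars.strip og) = true := by
    intro og
    rw [contains_bad]
    simp only [List.any_eq_true, beq_iff_eq]
    constructor
    · rintro ⟨b, hb, he⟩
      rw [strip_bad b hb] at he
      exact he ▸ hb
    · intro hb
      exact ⟨PySem.Chars.strip og, hb, (strip_bad _ hb).symm⟩
  constructor
  · intro hL
    split_ifs at hL with hu hb2
    · obtain ⟨w, hw, hfw⟩ := List.any_eq_true.mp hu
      exact Or.inl ⟨w, hw, (hchar w).mp hfw⟩
    · obtain ⟨g, hg, hfg⟩ := List.any_eq_true.mp hL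
      obtain ⟨p, hp, rfl⟩ := List.mem_map.mp hg
      exact Or.inr ⟨p, hp, (hchar _).mp hfg⟩
  · intro hr
    cases hr with
    | inl h1 =>
      obtain ⟨w, hw, hwc⟩ := h1
      have hu : (ws.any fun og => pvBad.any fun b =>
          PySem.Chars.strip og == PySem.Chars.strip b) = true :=
        List.any_eq_true.mpr ⟨w, hw, (hchar w).mpr hwc⟩
      simp [hu]
    | inr h2 =>
      obtain ⟨p, hp, hpc⟩ := h2
      have hlen2 : ts.length > 1 := by
        have h2le : 2 ≤ ws.length := by
          cases hws' : ws with
          | nil => rw [hws'] at hp; simp at hp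
          | cons a t =>
            cases ht : t with
            | nil => rw [hws', ht] at hp; simp at hp
            | cons b t2 => simp
        omega
      have hb2 : ((List.map (fun x => x.1 ++ ' ' :: x.2) (ws.zip ws.tail)).any fun og =>
          pvBad.any fun b => PySem.Chars.strip og == PySem.Chars.strip b) = true :=
        List.any_eq_true.mpr ⟨_, List.mem_map.mpr ⟨p, hp, rfl⟩, (hchar _).mpr hpc⟩
      by_cases hu : (ws.any fun og => pvBad.any fun b =>
          PySem.Chars.strip og == PySem.Chars.strip b) = true
      · simp [hu]
      · simp [hu, hlen2, hb2]

-- ===== VERDICT (by name: the statement is the Claim_ definition above) =====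
theorem is_bad_section_spec : Claim_equal_is_bad_section := by
  intro heading _ _
  unfold Spec_is_bad_section is_bad_section is_bad_section_alt
  by_cases hp : pvPrefixes.any (fun p => PySem.Str.startswith heading p) = true
  · rw [if_pos hp, if_pos hp]
  · rw [if_neg hp, if_neg hp]
    exact tail_eq (pvDropLead heading.toList)
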